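-- pv_equiv track=rewrite | github.com/LakMehta0210/2048-Sci-Comp | 2048-Sci-Comp-main/Autoplay.py | checkCombines
-- ===== SOURCE A (Python) =====
-- def boardcheck(old_state, current_state):
--     same_board = True
--     for y in range(len(current_state)):
--         for x in range(len(current_state[0])):
--             if old_state[y][x] != current_state[y][x]:
--                 same_board = False
--     return same_board
--
-- def combineLeft(gameboard, score):
--     for row in gameboard:
--         for i in range(len(row)-1):
--             if row[i] == row[i+1] and row[i] != None:
--                 row[i] = row[i] + row[i+1]
--                 score += row[i]
--                 row[i+1] = None
--     return gameboard, score
--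
-- def combineUp(gameboard, score):
--     for col_ind in range(len(gameboard[0])):
--         column = [gameboard[k][col_ind] for k in range(len(gameboard))]
--         for i in range(len(column)-1):
--             if column[i] == column[i+1] and column[i] != None:
--                 column[i] = column[i] + column[i+1]
--                 score += column[i]
--                 column[i+1] = None
--         for index in range(len(column)):
--             gameboard[index][col_ind] = column[index]
--     return gameboard, score
--
-- def checkCombines(gameboard):
--     phantom_board = [[gameboard[y][x] for x in range(len(gameboard[0]))] for y in range(len(gameboard))]
--     combines = False
--     #boardcheck used to see if combines had any effect
--     up_state, _ = combineUp(phantom_board, 0)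
--     left_state, _ = combineLeft(phantom_board, 0)
--     if not boardcheck(gameboard, up_state):
--         combines = True
--     elif not boardcheck(gameboard, left_state):
--         combines = True
--     return combines
-- ===== SOURCE B (Python) =====
-- def checkCombines(gameboard):
--     rows = len(gameboard)
--     cols = len(gameboard[0])
--     for y in range(rows):
--         for x in range(cols):
--             v = gameboard[y][x]
--             if v is None:
--                 continue
--             if x + 1 < cols and gameboard[y][x + 1] == v:
--                 return True
--             if y + 1 < rows and gameboard[y + 1][x] == v:
--                 return True
--     return False
-- ===== Notes on version B (the rewrite author's own statement) =====
-- stated objective: simpler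
-- what changed: B replaces A's copy-the-board, simulate combineUp then combineLeft and diff-against-the-original by a direct single nested scan that returns True as soon as some cell equals its right or down neighbour.
import Mathlib
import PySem

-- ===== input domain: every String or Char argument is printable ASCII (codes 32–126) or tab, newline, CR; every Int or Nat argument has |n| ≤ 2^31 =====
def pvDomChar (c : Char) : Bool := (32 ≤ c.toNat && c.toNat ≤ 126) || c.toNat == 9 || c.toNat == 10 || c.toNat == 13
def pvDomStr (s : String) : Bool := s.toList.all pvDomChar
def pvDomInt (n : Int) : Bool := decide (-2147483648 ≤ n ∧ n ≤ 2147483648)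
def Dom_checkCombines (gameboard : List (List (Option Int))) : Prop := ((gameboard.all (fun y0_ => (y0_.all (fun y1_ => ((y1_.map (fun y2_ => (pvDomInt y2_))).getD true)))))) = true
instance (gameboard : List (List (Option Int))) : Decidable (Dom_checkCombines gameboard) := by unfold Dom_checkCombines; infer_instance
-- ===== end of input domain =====

-- B replaces A's copy-the-board, simulate combineUp+combineLeft and diff against the
-- original by a direct single scan for an adjacent equal non-None pair (objective: simpler).

-- ===== PORT A =====

-- boardcheck: nested index loops setting same_board := False on a mismatch
def boardcheckA (old_state current_state : List (List (Option Int))) : Bool :=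
  (List.range current_state.length).foldl (fun same_board y =>
    (List.range (current_state.headD []).length).foldl (fun same_board x =>
      if ((old_state.getD y []).getD x none) ≠ ((current_state.getD y []).getD x none) then false
      else same_board) same_board) true

-- the inner merge loop shared verbatim by combineLeft (on a row) and combineUp (on a column):
-- for i in range(len(row)-1): if row[i]==row[i+1] and row[i]!=None: merge, add to score.
-- `row[i] + row[i+1]` adds two ints (the guard makes both non-None); ported via Option.getD 0.
def mergeLoop (row : List (Option Int)) (score : Int) : List (Option Int) × Int :=
  (List.range (row.length - 1)).foldl (fun (st : List (Option Int) × Int) i =>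
    let c := st.1
    if c.getD i none = c.getD (i+1) none ∧ c.getD i none ≠ none then
      let v := (c.getD i none).getD 0 + (c.getD (i+1) none).getD 0
      ((c.set i (some v)).set (i+1) none, st.2 + v)
    else st) (row, score)

-- combineLeft mutates each row in place; ported by rebuilding the row list in order
def combineLeftA (gameboard : List (List (Option Int))) (score : Int) :
    List (List (Option Int)) × Int :=
  gameboard.foldl (fun (acc : List (List (Option Int)) × Int) row =>
    let rs := mergeLoop row acc.2
    (acc.1 ++ [rs.1], rs.2)) ([], score)

-- combineUp: per column, read the column, run the merge loop, write it back in place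
def combineUpA (gameboard : List (List (Option Int))) (score : Int) :
    List (List (Option Int)) × Int :=
  (List.range (gameboard.headD []).length).foldl (fun (st : List (List (Option Int)) × Int) col_ind =>
    let g := st.1
    let column := (List.range g.length).map (fun k => (g.getD k []).getD col_ind none)
    let cs := mergeLoop column st.2
    let g' := (List.range cs.1.length).foldl (fun g2 index =>
      g2.set index ((g2.getD index []).set col_ind (cs.1.getD index none))) g
    (g', cs.2)) (gameboard, score)

def checkCombines (gameboard : List (List (Option Int))) : Bool :=
  let phantom_board := (List.range gameboard.length).map (fun y =>
    (List.range (gameboard.headD []).length).map (fun x => (gameboard.getD y []).getD x none))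
  -- in Python combineUp and combineLeft mutate phantom_board in place, so up_state and
  -- left_state alias one list, equal to the board after both passes
  let afterUp := combineUpA phantom_board 0
  let afterLeft := combineLeftA afterUp.1 0
  let up_state := afterLeft.1
  let left_state := afterLeft.1
  if !(boardcheckA gameboard up_state) then true
  else if !(boardcheckA gameboard left_state) then true
  else false

-- ===== PORT B =====
-- single scan: a merge is possible iff some cell equals its right or down neighbour
def checkCombines_alt (gameboard : List (List (Option Int))) : Bool :=
  let rows := gameboard.length
  let cols := (gameboard.headD []).length
  (List.range rows).any (fun y => (List.range cols).any (fun x =>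
    match (gameboard.getD y []).getD x none with
    | none => false
    | some v =>
      (decide (x + 1 < cols) && ((gameboard.getD y []).getD (x + 1) none == some v))
      || (decide (y + 1 < rows) && ((gameboard.getD (y + 1) []).getD x none == some v))))

-- ===== PRECONDITION & SPEC =====
-- Pre_ admits exactly the inputs where A returns: A raises IndexError on the empty board
-- and on boards with a row shorter than the first row (rows longer than the first are fine:
-- both programs ignore the extra cells).
def Pre_checkCombines (gameboard : List (List (Option Int))) : Prop :=
  gameboard ≠ [] ∧ ∀ r ∈ gameboard, (gameboard.headD []).length ≤ r.length
instance (gameboard : List (List (Option Int))) : Decidable (Pre_checkCombines gameboard) := by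
  unfold Pre_checkCombines; infer_instance

def pvWitness_checkCombines : List (List (Option Int)) :=
  [[some 2, some 2], [none, some 4]]

def Spec_checkCombines (gameboard : List (List (Option Int))) (out : Bool) : Prop := out = checkCombines_alt gameboard
instance (gameboard : List (List (Option Int))) (out : Bool) : Decidable (Spec_checkCombines gameboard out) := by unfold Spec_checkCombines; infer_instance

-- ===== CLAIM (what is proved, stated in full; the proofs are below) =====
def Claim_equal_checkCombines : Prop := ∀ (gameboard : List (List (Option Int))), Dom_checkCombines gameboard → Pre_checkCombines gameboard → Spec_checkCombines gameboard (checkCombines gameboard)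


-- ===== LEMMAS AND PROOFS =====

-- cell accessor used throughout the proofs
def pcell (g : List (List (Option Int))) (y x : Nat) : Option Int :=
  (g.getD y []).getD x none

-- one step of the merge loop, list component only
def pstep (c : List (Option Int)) (i : Nat) : List (Option Int) :=
  if c.getD i none = c.getD (i+1) none ∧ c.getD i none ≠ none then
    (c.set i (some ((c.getD i none).getD 0 + (c.getD (i+1) none).getD 0))).set (i+1) none
  else c

def ppass (l : List (Option Int)) : List (Option Int) :=
  (List.range (l.length - 1)).foldl pstep l

def hasPair (l : List (Option Int)) : Prop :=
  ∃ i, i + 1 < l.length ∧ l.getD i none = l.getD (i+1) none ∧ l.getD i none ≠ none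

def colL (g : List (List (Option Int))) (x : Nat) : List (Option Int) :=
  (List.range g.length).map (fun k => (g.getD k []).getD x none)

theorem getD_set' {α : Type} (l : List α) (i j : Nat) (a d : α) :
    (l.set i a).getD j d = if i = j ∧ i < l.length then a else l.getD j d := by
  simp only [List.getD_eq_getElem?_getD, List.getElem?_set]
  by_cases h1 : i = j
  · subst h1
    by_cases h2 : i < l.length
    · simp [h2]
    · simp [h2]
  · simp [h1]

theorem getD_range_map {α : Type} (n : Nat) (f : Nat → α) (y : Nat) (d : α) :
    ((List.range n).map f).getD y d = if y < n then f y else d := by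
  simp only [List.getD_eq_getElem?_getD]
  by_cases h : y < n
  · simp [h]
  · simp [h]

theorem list_ext_getD {α : Type} (l₁ l₂ : List α) (d : α) (hl : l₁.length = l₂.length)
    (h : ∀ i, l₁.getD i d = l₂.getD i d) : l₁ = l₂ := by
  apply List.ext_getElem hl
  intro i h1 h2
  have := h i
  rwa [List.getD_eq_getElem _ _ h1, List.getD_eq_getElem _ _ h2] at this

theorem mergeLoop_fold_fst (L : List Nat) (c : List (Option Int)) (s : Int) :
    (L.foldl (fun (st : List (Option Int) × Int) i =>
      if st.1.getD i none = st.1.getD (i+1) none ∧ st.1.getD i none ≠ none then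
        ((st.1.set i (some ((st.1.getD i none).getD 0 + (st.1.getD (i+1) none).getD 0))).set (i+1) none,
          st.2 + ((st.1.getD i none).getD 0 + (st.1.getD (i+1) none).getD 0))
      else st) (c, s)).1 = L.foldl pstep c := by
  induction L generalizing c s with
  | nil => rfl
  | cons a L ih =>
    simp only [List.foldl_cons]
    by_cases h : c.getD a none = c.getD (a+1) none ∧ c.getD a none ≠ none
    · rw [if_pos h, ih]
      rw [show pstep c a = (c.set a (some ((c.getD a none).getD 0 + (c.getD (a+1) none).getD 0))).set (a+1) none from by rw [pstep, if_pos h]]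
    · rw [if_neg h, ih, show pstep c a = c from by rw [pstep, if_neg h]]


-- the merge loop's list component ignores the score and is the pstep fold
theorem mergeLoop_fst (l : List (Option Int)) (s : Int) :
    (mergeLoop l s).1 = ppass l := by
  unfold mergeLoop ppass
  exact mergeLoop_fold_fst _ l s

theorem pstep_length (c : List (Option Int)) (i : Nat) : (pstep c i).length = c.length := by
  unfold pstep; split_ifs <;> simp

theorem foldl_pstep_length (L : List Nat) (c : List (Option Int)) :
    (L.foldl pstep c).length = c.length := by
  induction L generalizing c with
  | nil => rfl
  | cons a L ih => simp [List.foldl_cons, ih, pstep_length]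

theorem ppass_length (l : List (Option Int)) : (ppass l).length = l.length :=
  foldl_pstep_length _ l

theorem pstep_none (c : List (Option Int)) (i j : Nat) (h : c.getD j none = none) :
    (pstep c i).getD j none = none := by
  unfold pstep
  split_ifs with hg
  · rw [getD_set', getD_set']
    by_cases h1 : i + 1 = j
    · simp [h1, List.length_set]
      intro h2
      have hij : i ≠ j := by omega
      simp [hij]
      subst h1
      exact h
    · simp [h1]
      by_cases h2 : i = j
      · exfalso; exact hg.2 (h2 ▸ h)
      · simp only [h2, false_and, if_false]
        rw [← List.getD_eq_getElem?_getD]; exact h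
  · exact h

theorem foldl_pstep_none (L : List Nat) (c : List (Option Int)) (j : Nat)
    (h : c.getD j none = none) : (L.foldl pstep c).getD j none = none := by
  induction L generalizing c with
  | nil => exact h
  | cons a L ih => exact ih _ (pstep_none c a j h)

theorem ppass_none (l : List (Option Int)) (j : Nat) (h : l.getD j none = none) :
    (ppass l).getD j none = none := foldl_pstep_none _ l j h


theorem getD_none_of_le (c : List (Option Int)) (j : Nat) (h : c.length ≤ j) :
    c.getD j none = none := List.getD_eq_default c none h

theorem ppass_progress (l : List (Option Int)) (k : Nat) :
    ((List.range k).foldl pstep l = l) ∨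
    (∃ j, j < l.length ∧ l.getD j none ≠ none ∧
      ((List.range k).foldl pstep l).getD j none = none) := by
  induction k with
  | zero => left; rfl
  | succ k ih =>
    rw [List.range_succ, List.foldl_append, List.foldl_cons, List.foldl_nil]
    rcases ih with hl | ⟨j, hj, hne, hnone⟩
    · rw [hl]
      by_cases hg : l.getD k none = l.getD (k+1) none ∧ l.getD k none ≠ none
      · right
        have hlt : k + 1 < l.length := by
          by_contra hge
          exact (hg.1 ▸ hg.2) (getD_none_of_le l (k+1) (by omega))
        refine ⟨k+1, hlt, by rw [← hg.1]; exact hg.2, ?_⟩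
        rw [pstep, if_pos hg, getD_set']
        simp [List.length_set, hlt]
      · left; rw [pstep, if_neg hg]
    · right
      exact ⟨j, hj, hne, pstep_none _ k j hnone⟩

theorem ppass_id (l : List (Option Int)) (h : ¬ hasPair l) : ppass l = l := by
  have key : ∀ k, k ≤ l.length - 1 → (List.range k).foldl pstep l = l := by
    intro k
    induction k with
    | zero => intro _; rfl
    | succ k ih =>
      intro hk
      rw [List.range_succ, List.foldl_append, ih (by omega), List.foldl_cons, List.foldl_nil]
      rw [pstep, if_neg]
      intro hg
      exact h ⟨k, by omega, hg⟩
  exact key _ le_rfl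

theorem ppass_fire (l : List (Option Int)) (h : hasPair l) :
    ∃ j, j < l.length ∧ l.getD j none ≠ none ∧ (ppass l).getD j none = none := by
  obtain ⟨i, hi, heq, hne⟩ := h
  have hsplit : List.range (l.length - 1) =
      List.range (i+1) ++ (List.range (l.length - 1 - (i+1))).map ((i+1) + ·) := by
    rw [← List.range_add]
    congr 1
    omega
  unfold ppass
  rw [hsplit, List.foldl_append]
  rcases ppass_progress l (i+1) with hl | ⟨j, hj, hjne, hjnone⟩
  · rcases ppass_progress l i with hl2 | ⟨j, hj, hjne, hjnone⟩
    · refine ⟨i+1, hi, by rw [← heq]; exact hne, ?_⟩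
      rw [List.range_succ, List.foldl_append, List.foldl_cons, List.foldl_nil, hl2]
      apply foldl_pstep_none
      rw [pstep, if_pos ⟨heq, hne⟩, getD_set']
      simp [List.length_set, hi]
    · refine ⟨j, hj, hjne, ?_⟩
      apply foldl_pstep_none
      rw [List.range_succ, List.foldl_append, List.foldl_cons, List.foldl_nil]
      exact pstep_none _ i j hjnone
  · exact ⟨j, hj, hjne, foldl_pstep_none _ _ j hjnone⟩

-- write-back loop of combineUp
def wback (g : List (List (Option Int))) (x : Nat) (c : List (Option Int)) :
    List (List (Option Int)) :=
  (List.range c.length).foldl (fun g2 index =>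
    g2.set index ((g2.getD index []).set x (c.getD index none))) g

theorem wback_spec (g : List (List (Option Int))) (x : Nat) (c : List (Option Int)) :
    (wback g x c).length = g.length ∧
    ∀ y, (wback g x c).getD y [] =
      if y < c.length then (g.getD y []).set x (c.getD y none) else g.getD y [] := by
  unfold wback
  have aux : ∀ k, ((List.range k).foldl (fun g2 index =>
      g2.set index ((g2.getD index []).set x (c.getD index none))) g).length = g.length ∧
      ∀ y, ((List.range k).foldl (fun g2 index =>
        g2.set index ((g2.getD index []).set x (c.getD index none))) g).getD y [] =
        if y < k then (g.getD y []).set x (c.getD y none) else g.getD y [] := by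
    intro k
    induction k with
    | zero => exact ⟨rfl, fun y => by simp⟩
    | succ k ih =>
      rw [List.range_succ, List.foldl_append, List.foldl_cons, List.foldl_nil]
      obtain ⟨ihl, ihv⟩ := ih
      have hk0 : (List.foldl (fun g2 index =>
          g2.set index ((g2.getD index []).set x (c.getD index none))) g (List.range k)).getD k []
          = g.getD k [] := by
        rw [ihv k]; simp
      refine ⟨by rw [List.length_set, ihl], fun y => ?_⟩
      rw [getD_set', ihl, hk0, ihv y]
      by_cases h1 : k = y ∧ k < g.length
      · obtain ⟨rfl, hk⟩ := h1
        rw [if_pos ⟨rfl, hk⟩, if_pos (Nat.lt_succ_self k)]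
      · rw [if_neg h1]
        by_cases h2 : y < k
        · rw [if_pos h2, if_pos (by omega)]
        · rw [if_neg h2]
          by_cases h3 : y = k
          · subst h3
            rw [if_pos (by omega)]
            have hlen : g.length ≤ y := by
              by_contra hc
              exact h1 ⟨rfl, by omega⟩
            rw [List.getD_eq_default g [] hlen]
            simp
          · rw [if_neg (by omega)]
  have h := aux c.length
  exact ⟨h.1, h.2⟩

theorem combineLeft_fst (g : List (List (Option Int))) (s : Int) :
    (combineLeftA g s).1 = g.map ppass := by
  unfold combineLeftA
  have aux : ∀ (g : List (List (Option Int))) (acc : List (List (Option Int))) (s : Int),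
      (g.foldl (fun (acc : List (List (Option Int)) × Int) row =>
        (acc.1 ++ [(mergeLoop row acc.2).1], (mergeLoop row acc.2).2)) (acc, s)).1
      = acc ++ g.map ppass := by
    intro g
    induction g with
    | nil => intro acc s; simp
    | cons r g ih =>
      intro acc s
      simp only [List.foldl_cons, List.map_cons]
      rw [ih, mergeLoop_fst]
      simp
  exact aux g [] s

theorem combineUp_fst (g : List (List (Option Int))) (s : Int) :
    (combineUpA g s).1 =
      (List.range ((g.headD []).length)).foldl (fun g2 x => wback g2 x (ppass (colL g2 x))) g := by
  unfold combineUpA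
  have aux : ∀ (L : List Nat) (g : List (List (Option Int))) (s : Int),
      (L.foldl (fun (st : List (List (Option Int)) × Int) col_ind =>
        ((List.range (mergeLoop ((List.range st.1.length).map
            (fun k => (st.1.getD k []).getD col_ind none)) st.2).1.length).foldl
          (fun g2 index => g2.set index ((g2.getD index []).set col_ind
            ((mergeLoop ((List.range st.1.length).map
              (fun k => (st.1.getD k []).getD col_ind none)) st.2).1.getD index none))) st.1,
         (mergeLoop ((List.range st.1.length).map
            (fun k => (st.1.getD k []).getD col_ind none)) st.2).2)) (g, s)).1
      = L.foldl (fun g2 x => wback g2 x (ppass (colL g2 x))) g := by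
    intro L
    induction L with
    | nil => intro g s; rfl
    | cons a L ih =>
      intro g s
      simp only [List.foldl_cons]
      rw [ih]
      congr 1
      unfold wback colL
      rw [mergeLoop_fst]
  exact aux _ g s

-- characterisation of combineUp on a board whose rows all have length m
theorem combineUp_cells (P : List (List (Option Int))) (m : Nat)
    (hrow : ∀ y, (P.getD y []).length = if y < P.length then m else 0) :
    (combineUpA P 0).1.length = P.length ∧
    (∀ y, ((combineUpA P 0).1.getD y []).length = if y < P.length then m else 0) ∧
    (∀ y x, pcell (combineUpA P 0).1 y x =
      if x < m then (ppass (colL P x)).getD y none else pcell P y x) := by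
  have hhead : P.headD [] = P.getD 0 [] := by cases P <;> rfl
  rw [combineUp_fst]
  by_cases hP : P = []
  · subst hP
    refine ⟨rfl, fun y => by simp, fun y x => ?_⟩
    have h1 : pcell ([] : List (List (Option Int))) y x = none := by
      simp [pcell]
    have h2 : (ppass (colL ([] : List (List (Option Int))) x)).getD y none = none := by
      simp [colL, ppass]
    simp only [List.headD_nil, List.length_nil, List.range_zero, List.foldl_nil]
    rw [h1]
    split_ifs with h
    · rw [h2]
    · rfl
  · have hM : (P.headD []).length = m := by
      rw [hhead, hrow 0, if_pos (List.length_pos_of_ne_nil hP)]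
    rw [hM]
    have aux : ∀ k, k ≤ m →
        ((List.range k).foldl (fun g2 x => wback g2 x (ppass (colL g2 x))) P).length = P.length ∧
        (∀ y, (((List.range k).foldl (fun g2 x => wback g2 x (ppass (colL g2 x))) P).getD y []).length
            = (P.getD y []).length) ∧
        (∀ y x, pcell ((List.range k).foldl (fun g2 x => wback g2 x (ppass (colL g2 x))) P) y x
            = if x < k then (ppass (colL P x)).getD y none else pcell P y x) := by
      intro k
      induction k with
      | zero => exact fun _ => ⟨rfl, fun y => rfl, fun y x => by simp [pcell]⟩
      | succ k ih =>
        intro hk1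
        obtain ⟨ihl, ihr, ihc⟩ := ih (by omega)
        rw [List.range_succ, List.foldl_append, List.foldl_cons, List.foldl_nil]
        set g := (List.range k).foldl (fun g2 x => wback g2 x (ppass (colL g2 x))) P with hgdef
        have hcol : colL g k = colL P k := by
          unfold colL
          rw [ihl]
          apply List.map_congr_left
          intro y hy
          have := ihc y k
          rw [if_neg (by omega)] at this
          exact this
        rw [hcol]
        set c' := ppass (colL P k) with hc'def
        have hc'len : c'.length = P.length := by
          rw [hc'def, ppass_length]
          unfold colL
          simp
        obtain ⟨hwl, hwv⟩ := wback_spec g k c'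
        refine ⟨by rw [hwl, ihl], fun y => ?_, fun y x => ?_⟩
        · rw [hwv y]
          by_cases hy : y < c'.length
          · rw [if_pos hy, List.length_set, ihr y]
          · rw [if_neg hy, ihr y]
        · by_cases hy : y < c'.length
          · rw [pcell, hwv y, if_pos hy, getD_set']
            have hylen : (g.getD y []).length = m := by
              rw [ihr y, hrow y, if_pos (by omega)]
            by_cases hx : k = x
            · subst hx
              rw [if_pos ⟨rfl, by omega⟩, if_pos (by omega)]
            · rw [if_neg (by simp [hx]), ← pcell, ihc y x]
              by_cases hxk : x < k
              · rw [if_pos hxk, if_pos (by omega)]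
              · rw [if_neg hxk, if_neg (by omega)]
          · rw [pcell, hwv y, if_neg hy, ← pcell, ihc y x]
            have hyP : P.length ≤ y := by omega
            have hPnone : pcell P y x = none := by
              rw [pcell, List.getD_eq_default P [] hyP]
              rfl
            by_cases hxk : x < k
            · rw [if_pos hxk, if_pos (by omega)]
            · rw [if_neg hxk]
              by_cases hxk1 : x < k + 1
              · rw [if_pos hxk1, hPnone]
                have hxeq : x = k := by omega
                subst hxeq
                rw [getD_none_of_le _ _ (by rw [← hc'def, hc'len]; omega)]
              · rw [if_neg hxk1]
    obtain ⟨hl, hr, hc⟩ := aux m le_rfl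
    exact ⟨hl, fun y => by rw [hr y, hrow y], hc⟩


theorem foldl_inner_eq (old cur : List (List (Option Int))) (y : Nat) (L : List Nat) (b : Bool) :
    (L.foldl (fun same_board x =>
      if ((old.getD y []).getD x none) ≠ ((cur.getD y []).getD x none) then false
      else same_board) b)
    = (b && L.all (fun x => ((old.getD y []).getD x none) == ((cur.getD y []).getD x none))) := by
  induction L generalizing b with
  | nil => simp
  | cons a L ih =>
    simp only [List.foldl_cons, List.all_cons]
    by_cases h : ((old.getD y []).getD a none) = ((cur.getD y []).getD a none)
    · rw [if_neg (fun hc => hc h), ih]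
      rw [show (((old.getD y []).getD a none) == ((cur.getD y []).getD a none)) = true from beq_iff_eq.mpr h]
      simp
    · rw [if_pos h, ih]
      rw [show (((old.getD y []).getD a none) == ((cur.getD y []).getD a none)) = false from beq_eq_false_iff_ne.mpr h]
      simp

theorem foldl_outer_eq (old cur : List (List (Option Int))) (L : List Nat) (b : Bool) :
    (L.foldl (fun same_board y =>
      (List.range (cur.headD []).length).foldl (fun same_board x =>
        if ((old.getD y []).getD x none) ≠ ((cur.getD y []).getD x none) then false
        else same_board) same_board) b)
    = (b && L.all (fun y => (List.range (cur.headD []).length).all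
        (fun x => ((old.getD y []).getD x none) == ((cur.getD y []).getD x none)))) := by
  induction L generalizing b with
  | nil => simp
  | cons a L ih =>
    simp only [List.foldl_cons, List.all_cons]
    rw [foldl_inner_eq, ih, Bool.and_assoc]

theorem boardcheck_iff (old cur : List (List (Option Int))) :
    boardcheckA old cur = true ↔
      ∀ y, y < cur.length → ∀ x, x < (cur.headD []).length → pcell old y x = pcell cur y x := by
  unfold boardcheckA
  rw [foldl_outer_eq]
  simp [List.all_eq_true, List.mem_range, pcell]


theorem headD_eq_getD_zero {α : Type} (l : List α) (d : α) : l.headD d = l.getD 0 d := by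
  cases l <;> rfl

theorem alt_iff (g : List (List (Option Int))) :
    checkCombines_alt g = true ↔
    ∃ y, y < g.length ∧ ∃ x, x < (g.headD []).length ∧ pcell g y x ≠ none ∧
      ((x + 1 < (g.headD []).length ∧ pcell g y (x+1) = pcell g y x) ∨
       (y + 1 < g.length ∧ pcell g (y+1) x = pcell g y x)) := by
  unfold checkCombines_alt
  simp only [List.any_eq_true, List.mem_range]
  constructor
  · rintro ⟨y, hy, x, hx, hmatch⟩
    cases hv : (g.getD y []).getD x none with
    | none => rw [hv] at hmatch; simp at hmatch
    | some v =>
      rw [hv] at hmatch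
      simp only [Bool.or_eq_true, Bool.and_eq_true, decide_eq_true_eq, beq_iff_eq] at hmatch
      refine ⟨y, hy, x, hx, by rw [pcell, hv]; simp, ?_⟩
      rcases hmatch with ⟨h1, h2⟩ | ⟨h1, h2⟩
      · exact Or.inl ⟨h1, by rw [pcell, pcell, h2, hv]⟩
      · exact Or.inr ⟨h1, by rw [pcell, pcell, h2, hv]⟩
  · rintro ⟨y, hy, x, hx, hne, hor⟩
    refine ⟨y, hy, x, hx, ?_⟩
    cases hv : (g.getD y []).getD x none with
    | none => exact absurd (by rw [pcell, hv]) hne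
    | some v =>
      simp only [Bool.or_eq_true, Bool.and_eq_true, decide_eq_true_eq, beq_iff_eq]
      rcases hor with ⟨h1, h2⟩ | ⟨h1, h2⟩
      · rw [pcell, pcell, hv] at h2
        exact Or.inl ⟨h1, h2⟩
      · rw [pcell, pcell, hv] at h2
        exact Or.inr ⟨h1, h2⟩


def phantomOf (g : List (List (Option Int))) : List (List (Option Int)) :=
  (List.range g.length).map (fun y =>
    (List.range ((g.headD []).length)).map (fun x => (g.getD y []).getD x none))

theorem getD_map' {α β : Type} (l : List α) (f : α → β) (y : Nat) (d : β) (d' : α)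
    (h : y < l.length) : (l.map f).getD y d = f (l.getD y d') := by
  rw [List.getD_eq_getElem _ _ (by simpa using h), List.getElem_map, List.getD_eq_getElem _ _ h]

theorem ph_len (g : List (List (Option Int))) : (phantomOf g).length = g.length := by
  simp [phantomOf]

theorem ph_row (g : List (List (Option Int))) (y : Nat) :
    (phantomOf g).getD y [] = if y < g.length then
      (List.range ((g.headD []).length)).map (fun x => (g.getD y []).getD x none) else [] := by
  unfold phantomOf
  rw [getD_range_map]

theorem ph_rowlen (g : List (List (Option Int))) (y : Nat) :
    ((phantomOf g).getD y []).length =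
      if y < (phantomOf g).length then (g.headD []).length else 0 := by
  rw [ph_row, ph_len]
  split_ifs <;> simp

theorem ph_cell (g : List (List (Option Int))) (y x : Nat) :
    pcell (phantomOf g) y x =
      if y < g.length ∧ x < (g.headD []).length then pcell g y x else none := by
  rw [pcell, ph_row]
  by_cases hy : y < g.length
  · rw [if_pos hy, getD_range_map]
    by_cases hx : x < (g.headD []).length
    · rw [if_pos hx, if_pos ⟨hy, hx⟩]
      rfl
    · rw [if_neg hx, if_neg (by tauto)]
  · rw [if_neg hy, if_neg (by tauto)]
    rfl

theorem col_cell (g : List (List (Option Int))) (x y : Nat) :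
    (colL (phantomOf g) x).getD y none =
      if y < g.length then pcell (phantomOf g) y x else none := by
  unfold colL
  rw [ph_len, getD_range_map]
  split_ifs with h
  · rfl
  · rfl

theorem col_len (g : List (List (Option Int))) (x : Nat) :
    (colL (phantomOf g) x).length = g.length := by
  simp [colL, ph_len]

theorem checkCombines_eq (g : List (List (Option Int))) :
    checkCombines g = !(boardcheckA g ((combineUpA (phantomOf g) 0).1.map ppass)) := by
  unfold checkCombines phantomOf
  simp only []
  rw [combineLeft_fst]
  cases hbc : boardcheckA g ((combineUpA
      ((List.range g.length).map (fun y =>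
        (List.range ((g.headD []).length)).map (fun x => (g.getD y []).getD x none))) 0).1.map ppass)
  · simp
  · simp

theorem main_eq (g : List (List (Option Int))) :
    checkCombines g = checkCombines_alt g := by
  rw [checkCombines_eq]
  obtain ⟨hul, hur, huc⟩ := combineUp_cells (phantomOf g) ((g.headD []).length) (ph_rowlen g)
  -- abbreviations
  have hLlen : ((combineUpA (phantomOf g) 0).1.map ppass).length = g.length := by
    rw [List.length_map, hul, ph_len]
  have hLrow : ∀ y, y < g.length →
      ((combineUpA (phantomOf g) 0).1.map ppass).getD y [] =
        ppass ((combineUpA (phantomOf g) 0).1.getD y []) := by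
    intro y hy
    exact getD_map' _ _ y [] [] (by rw [hul, ph_len]; exact hy)
  have hrow0 : 0 < g.length →
      ((((combineUpA (phantomOf g) 0).1.map ppass).headD [])).length = (g.headD []).length := by
    intro hn
    rw [headD_eq_getD_zero, hLrow 0 hn, ppass_length, hur 0, ph_len, if_pos hn]
  -- B characterisation in terms of phantom columns/rows
  have hBiff : checkCombines_alt g = true ↔
      ((∃ x, x < (g.headD []).length ∧ hasPair (colL (phantomOf g) x)) ∨
       (∃ y, y < g.length ∧ hasPair ((phantomOf g).getD y []))) := by
    rw [alt_iff]
    constructor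
    · rintro ⟨y, hy, x, hx, hne, hor⟩
      rcases hor with ⟨h1, h2⟩ | ⟨h1, h2⟩
      · right
        refine ⟨y, hy, x, ?_, ?_, ?_⟩
        · rw [ph_rowlen, ph_len, if_pos hy]; exact h1
        · show ((phantomOf g).getD y []).getD x none = ((phantomOf g).getD y []).getD (x+1) none
          show pcell (phantomOf g) y x = pcell (phantomOf g) y (x+1)
          rw [ph_cell, ph_cell, if_pos ⟨hy, hx⟩, if_pos ⟨hy, h1⟩]
          exact h2.symm
        · show ((phantomOf g).getD y []).getD x none ≠ none
          show pcell (phantomOf g) y x ≠ none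
          rw [ph_cell, if_pos ⟨hy, hx⟩]
          exact hne
      · left
        refine ⟨x, hx, y, ?_, ?_, ?_⟩
        · rw [col_len]; exact h1
        · rw [col_cell, col_cell, if_pos hy, if_pos h1, ph_cell, ph_cell,
            if_pos ⟨hy, hx⟩, if_pos ⟨h1, hx⟩]
          exact h2.symm
        · rw [col_cell, if_pos hy, ph_cell, if_pos ⟨hy, hx⟩]
          exact hne
    · rintro (⟨x, hx, i, hilen, heq, hne⟩ | ⟨y, hy, i, hilen, heq, hne⟩)
      · rw [col_len] at hilen
        rw [col_cell, if_pos (by omega), ph_cell, if_pos ⟨by omega, hx⟩] at hne heq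
        rw [col_cell, if_pos hilen, ph_cell, if_pos ⟨hilen, hx⟩] at heq
        exact ⟨i, by omega, x, hx, hne, Or.inr ⟨hilen, heq.symm⟩⟩
      · rw [ph_rowlen, ph_len, if_pos hy] at hilen
        have hg1 : ((phantomOf g).getD y []).getD i none = pcell (phantomOf g) y i := rfl
        have hg2 : ((phantomOf g).getD y []).getD (i+1) none = pcell (phantomOf g) y (i+1) := rfl
        rw [hg1, ph_cell, if_pos ⟨hy, by omega⟩] at hne heq
        rw [hg2, ph_cell, if_pos ⟨hy, hilen⟩] at heq
        exact ⟨y, hy, i, by omega, hne, Or.inl ⟨hilen, heq.symm⟩⟩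
  -- the no-vertical-pair consequence: combineUp leaves the phantom unchanged
  have hUP : (∀ x, x < (g.headD []).length → ¬ hasPair (colL (phantomOf g) x)) →
      (combineUpA (phantomOf g) 0).1 = phantomOf g := by
    intro hv
    apply list_ext_getD _ _ ([] : List (Option Int)) (by rw [hul])
    intro y
    by_cases hy : y < g.length
    · apply list_ext_getD _ _ (none : Option Int) (by rw [hur y, ph_rowlen])
      intro x
      show pcell (combineUpA (phantomOf g) 0).1 y x = pcell (phantomOf g) y x
      rw [huc y x]
      by_cases hx : x < (g.headD []).length
      · rw [if_pos hx, ppass_id _ (hv x hx), col_cell, if_pos hy]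
      · rw [if_neg hx]
    · rw [List.getD_eq_default _ [] (by rw [hul, ph_len]; omega),
        List.getD_eq_default _ [] (by rw [ph_len]; omega)]
  by_cases hv : ∃ x, x < (g.headD []).length ∧ hasPair (colL (phantomOf g) x)
  · -- a vertical pair exists: the simulated board differs, both sides are true
    obtain ⟨x, hx, hpair⟩ := hv
    obtain ⟨j, hj, hne, hnone⟩ := ppass_fire _ hpair
    rw [col_len] at hj
    have hpu : pcell (combineUpA (phantomOf g) 0).1 j x = none := by
      rw [huc j x, if_pos hx]; exact hnone
    have hpL : pcell ((combineUpA (phantomOf g) 0).1.map ppass) j x = none := by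
      rw [pcell, hLrow j hj]
      exact ppass_none _ _ hpu
    have hgne : pcell g j x ≠ none := by
      rw [col_cell, if_pos hj, ph_cell, if_pos ⟨hj, hx⟩] at hne
      exact hne
    have hbc : boardcheckA g ((combineUpA (phantomOf g) 0).1.map ppass) = false := by
      cases hb : boardcheckA g ((combineUpA (phantomOf g) 0).1.map ppass)
      · rfl
      · exfalso
        have hall := (boardcheck_iff _ _).mp hb
        have := hall j (by rw [hLlen]; exact hj) x (by rw [hrow0 (by omega)]; exact hx)
        exact hgne (this.trans hpL)
    rw [hbc, hBiff.mpr (Or.inl ⟨x, hx, hpair⟩)]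
    rfl
  · have hv' : ∀ x, x < (g.headD []).length → ¬ hasPair (colL (phantomOf g) x) :=
      fun x hx hp => hv ⟨x, hx, hp⟩
    have hup := hUP hv'
    by_cases hh : ∃ y, y < g.length ∧ hasPair ((phantomOf g).getD y [])
    · -- a horizontal pair exists: combineLeft changes the board, both sides are true
      obtain ⟨y, hy, hpair⟩ := hh
      obtain ⟨j, hjlen, hne, hnone⟩ := ppass_fire _ hpair
      rw [ph_rowlen, ph_len, if_pos hy] at hjlen
      have hpL : pcell ((combineUpA (phantomOf g) 0).1.map ppass) y j = none := by
        rw [pcell, hLrow y hy, hup]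
        exact hnone
      have hgne : pcell g y j ≠ none := by
        have : ((phantomOf g).getD y []).getD j none = pcell (phantomOf g) y j := rfl
        rw [this, ph_cell, if_pos ⟨hy, hjlen⟩] at hne
        exact hne
      have hbc : boardcheckA g ((combineUpA (phantomOf g) 0).1.map ppass) = false := by
        cases hb : boardcheckA g ((combineUpA (phantomOf g) 0).1.map ppass)
        · rfl
        · exfalso
          have hall := (boardcheck_iff _ _).mp hb
          have := hall y (by rw [hLlen]; exact hy) j (by rw [hrow0 (by omega)]; exact hjlen)
          exact hgne (this.trans hpL)
      rw [hbc, hBiff.mpr (Or.inr ⟨y, hy, hpair⟩)]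
      rfl
    · -- no pair at all: the simulation leaves the board unchanged, both sides are false
      have hh' : ∀ y, y < g.length → ¬ hasPair ((phantomOf g).getD y []) :=
        fun y hy hp => hh ⟨y, hy, hp⟩
      have hLP : ((combineUpA (phantomOf g) 0).1.map ppass) = phantomOf g := by
        apply list_ext_getD _ _ ([] : List (Option Int)) (by rw [hLlen, ph_len])
        intro y
        by_cases hy : y < g.length
        · rw [hLrow y hy, hup, ppass_id _ (hh' y hy)]
        · rw [List.getD_eq_default _ [] (by rw [hLlen]; omega),
            List.getD_eq_default _ [] (by rw [ph_len]; omega)]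
      have hbc : boardcheckA g ((combineUpA (phantomOf g) 0).1.map ppass) = true := by
        rw [hLP]
        apply (boardcheck_iff _ _).mpr
        intro y hy x hx
        rw [ph_len] at hy
        rw [headD_eq_getD_zero, ph_rowlen, ph_len, if_pos (by omega)] at hx
        rw [ph_cell, if_pos ⟨hy, hx⟩]
      have halt : checkCombines_alt g = false := by
        cases ha : checkCombines_alt g
        · rfl
        · exact absurd (hBiff.mp ha) (by push Not; exact ⟨fun x hx => hv' x hx, fun y hy => hh' y hy⟩)
      rw [hbc, halt]
      rfl

-- ===== VERDICT (by name: the statement is the Claim_ definition above) =====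
theorem checkCombines_spec : Claim_equal_checkCombines := by
  intro gameboard _ _
  unfold Spec_checkCombines
  exact main_eq gameboard
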